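-- pv_equiv track=rewrite | github.com/adi-bal/SCL2022 | billboard.py | billboard
-- ===== SOURCE A (Python) =====
-- from collections import defaultdict
--
-- def billboard(line):
--     Dic =defaultdict(int)
--     Dic[0]=0
--     for a in line:
--         D2=Dic.copy()
--         for d,s in Dic.items():
--             s1 = s+a
--             for d2 in [d-a,d+a]:
--                 D2[abs(d2)] = max(D2[abs(d2)],s1)
--         Dic=D2
--     return Dic[0]//2
-- ===== SOURCE B (Python) =====
-- def billboard(line):
--     n = len(line)
--     memo = {}
--
--     def rec(i, k):
--         # best recorded total height over the first i rods for two stacks whose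
--         # heights differ by exactly k (None: that difference cannot be formed;
--         # a difference first formed by adding a rod starts from the 0 baseline,
--         # matching the defaultdict(int) semantics of the table version)
--         if i == 0:
--             return 0 if k == 0 else None
--         if (i, k) in memo:
--             return memo[(i, k)]
--         a = line[i - 1]
--         best = rec(i - 1, k)
--         for c in (rec(i - 1, abs(k - a)), rec(i - 1, abs(k + a))):
--             if c is not None:
--                 best = max(best if best is not None else 0, c + a)
--         memo[(i, k)] = best
--         return best
--
--     return rec(n, 0) // 2
-- ===== Notes on version B (the rewrite author's own statement) =====
-- stated objective: alternative
-- what changed: Replaces the iterative dict-of-absolute-differences DP (rebuilding a difference table per rod) with a top-down memoized recursion rec(i, k) over the number of rods considered and the absolute height difference k, using None for unformable differences and the same 0 baseline a freshly formed difference gets from defaultdict(int).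
import Mathlib
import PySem

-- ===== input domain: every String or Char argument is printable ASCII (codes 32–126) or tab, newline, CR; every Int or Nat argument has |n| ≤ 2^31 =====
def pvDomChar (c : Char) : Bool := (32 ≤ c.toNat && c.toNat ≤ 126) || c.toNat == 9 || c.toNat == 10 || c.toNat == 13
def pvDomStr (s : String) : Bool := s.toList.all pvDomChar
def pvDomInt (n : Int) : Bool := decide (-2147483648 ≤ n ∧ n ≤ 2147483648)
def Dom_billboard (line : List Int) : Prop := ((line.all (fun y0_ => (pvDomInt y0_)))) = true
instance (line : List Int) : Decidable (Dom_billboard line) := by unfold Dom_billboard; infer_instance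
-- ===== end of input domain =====

-- B replaces A's per-rod rebuild of a dict of absolute height differences by a top-down
-- memoized recursion over (number of rods considered, absolute height difference); alternative
-- decomposition, same asymptotic cost.

-- ===== PORT A =====
-- inner loop body: for d2 in [d-a, d+a]: D2[abs(d2)] = max(D2[abs(d2)], s1)
-- (defaultdict(int): a missing key reads as 0, hence the getD _ 0)
def billboardInner (a : Int) (d2 : PySem.Dict Int Int) (ds : Int × Int) : PySem.Dict Int Int :=
  let s1 := ds.2 + a
  [ds.1 - a, ds.1 + a].foldl (fun d2 dd => d2.insert |dd| (max (d2.getD |dd| 0) s1)) d2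

-- one iteration of the outer loop: D2 = Dic.copy(); for d, s in Dic.items(): …; Dic = D2
def billboardStep (dic : PySem.Dict Int Int) (a : Int) : PySem.Dict Int Int :=
  dic.items.foldl (billboardInner a) dic

def billboard (line : List Int) : Int :=
  let dic := line.foldl billboardStep ((PySem.Dict.empty).insert 0 0)
  PySem.Int.floordiv (dic.getD 0 0) 2

-- ===== PORT B =====
-- one candidate update: 'if c is not None: best = max(best if best is not None else 0, c + a)'
def billboardCombine (best : Option Int) (a : Int) (c : Option Int) : Option Int :=
  match c with
  | none => best
  | some cv => some (max (best.getD 0) (cv + a))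

-- rec(i, k) of Source B, with the memo dict threaded through; recursion on i
def billboardRec (line : List Int) : Nat → Int → PySem.Dict (Nat × Int) (Option Int) →
    Option Int × PySem.Dict (Nat × Int) (Option Int)
  | 0, k, memo => ((if k = 0 then some 0 else none), memo)
  | i + 1, k, memo =>
    match memo.get? (i + 1, k) with
    | some v => (v, memo)
    | none =>
      let a := (PySem.List.pyGet? line (i : Int)).getD 0  -- line[i - 1]; every call has i - 1 in range
      let p0 := billboardRec line i k memo
      let p1 := billboardRec line i |k - a| p0.2
      let b1 := billboardCombine p0.1 a p1.1
      let p2 := billboardRec line i |k + a| p1.2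
      let b2 := billboardCombine b1 a p2.1
      (b2, p2.2.insert (i + 1, k) b2)

def billboard_alt (line : List Int) : Int :=
  -- rec(n, 0) is never None (difference 0 is always formable); the getD default is unreachable
  PySem.Int.floordiv (((billboardRec line line.length 0 PySem.Dict.empty).1).getD 0) 2

-- ===== PRECONDITION & SPEC =====
def Spec_billboard (line : List Int) (out : Int) : Prop := out = billboard_alt line
instance (line : List Int) (out : Int) : Decidable (Spec_billboard line out) := by unfold Spec_billboard; infer_instance

-- ===== CLAIM (what is proved, stated in full; the proofs are below) =====
def Claim_equal_billboard : Prop := ∀ (line : List Int), Dom_billboard line → Spec_billboard line (billboard line)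

-- ===== LEMMAS AND PROOFS =====

-- the common value semantics: G r k = value recorded for absolute difference k after the rods of r
-- (head processed last); none = the key is absent
def G : List Int → Int → Option Int
  | [], k => if k = 0 then some 0 else none
  | a :: r, k => billboardCombine (billboardCombine (G r k) a (G r |k - a|)) a (G r |k + a|)

theorem combine_nonneg {best : Option Int} {a : Int} (c : Option Int)
    (hb : ∀ v, best = some v → 0 ≤ v) :
    ∀ v, billboardCombine best a c = some v → 0 ≤ v := by
  intro v h
  cases c with
  | none => exact hb v h
  | some cv =>
    simp only [billboardCombine, Option.some.injEq] at h
    subst h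
    have h0 : 0 ≤ best.getD 0 := by
      cases hbv : best with
      | none => simp
      | some b => simpa using hb b hbv
    exact le_trans h0 (le_max_left _ _)

theorem G_nonneg (r : List Int) : ∀ k v, G r k = some v → 0 ≤ v := by
  induction r with
  | nil => intro k v h; simp only [G] at h; split at h <;> simp_all
  | cons a t ih =>
    intro k v h
    exact combine_nonneg _ (combine_nonneg _ (ih k)) v h

-- ----- B side -----

def GoodMemo (line : List Int) (memo : PySem.Dict (Nat × Int) (Option Int)) : Prop :=
  ∀ j e v, memo.get? (j, e) = some v → v = G ((line.take j).reverse) e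

theorem billboardRec_correct (line : List Int) :
    ∀ (i : Nat) (k : Int) (memo : PySem.Dict (Nat × Int) (Option Int)),
      i ≤ line.length → GoodMemo line memo →
      (billboardRec line i k memo).1 = G ((line.take i).reverse) k ∧
        GoodMemo line (billboardRec line i k memo).2 := by
  intro i
  induction i with
  | zero =>
    intro k memo _ hm
    exact ⟨by simp [billboardRec, G], hm⟩
  | succ i ih =>
    intro k memo hlen hm
    have hi : i < line.length := by omega
    have hrev : ((line.take (i + 1)).reverse) = (getElem line i hi) :: (line.take i).reverse := by
      rw [List.take_succ_eq_append_getElem hi, List.reverse_append]; rfl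
    rw [billboardRec]
    cases hg : memo.get? (i + 1, k) with
    | some v =>
      refine ⟨?_, hm⟩
      simpa using hm (i + 1) k v hg
    | none =>
      simp only []
      have ha : (PySem.List.pyGet? line (i : Int)).getD 0 = getElem line i hi := by
        rw [PySem.List.pyGet?_ofNat line i hi]; rfl
      rw [ha]
      obtain ⟨e0, g0⟩ := ih k memo (by omega) hm
      obtain ⟨e1, g1⟩ := ih |k - getElem line i hi| _ (by omega) g0
      obtain ⟨e2, g2⟩ := ih |k + getElem line i hi| _ (by omega) g1
      constructor
      · simp only [e0, e1, e2, hrev, G]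
      · intro j e v hv
        rw [PySem.Dict.get?_insert] at hv
        split at hv
        · rename_i hje
          rw [Prod.mk.injEq] at hje
          obtain ⟨rfl, rfl⟩ := hje
          cases hv
          simp only [e0, e1, e2, hrev, G]
        · exact g2 j e v hv

theorem billboard_alt_eq (line : List Int) :
    billboard_alt line = PySem.Int.floordiv ((G line.reverse 0).getD 0) 2 := by
  unfold billboard_alt
  have h := (billboardRec_correct line line.length 0 PySem.Dict.empty (le_refl _)
    (by intro j e v hv; rw [PySem.Dict.get?_empty] at hv; cases hv)).1
  rw [h, List.take_length]

-- ----- A side -----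

-- the multiset of values written at key k during one outer-loop iteration
def hsOf (a k : Int) (L : List (Int × Int)) : List Int :=
  L.filterMap (fun ds => if |ds.1 - a| = k ∨ |ds.1 + a| = k then some (ds.2 + a) else none)

-- the write fold at one key (the defaultdict 0 appears on a fresh key)
def clampfold (W : List Int) (init : Option Int) : Option Int :=
  W.foldl (fun acc s1 => some (max (acc.getD 0) s1)) init

theorem inner_get? (a : Int) (m : PySem.Dict Int Int) (ds : Int × Int) (k : Int) :
    (billboardInner a m ds).get? k =
      if |ds.1 - a| = k ∨ |ds.1 + a| = k
      then some (max ((m.get? k).getD 0) (ds.2 + a))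
      else m.get? k := by
  have hb : billboardInner a m ds =
      (m.insert |ds.1 - a| (max (m.getD |ds.1 - a| 0) (ds.2 + a))).insert |ds.1 + a|
        (max ((m.insert |ds.1 - a| (max (m.getD |ds.1 - a| 0) (ds.2 + a))).getD |ds.1 + a| 0)
          (ds.2 + a)) := rfl
  rw [hb, PySem.Dict.get?_insert, PySem.Dict.getD_insert, PySem.Dict.get?_insert]
  by_cases h2 : k = |ds.1 + a| <;> by_cases h1 : k = |ds.1 - a|
  · rw [if_pos h2, if_pos (by omega : |ds.1 + a| = |ds.1 - a|),
      if_pos (Or.inl h1.symm), ← h1, PySem.Dict.getD_eq_get?_getD, max_assoc, max_self]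
  · rw [if_pos h2, if_neg (by omega : ¬ |ds.1 + a| = |ds.1 - a|),
      if_pos (Or.inr h2.symm), ← h2, PySem.Dict.getD_eq_get?_getD]
  · rw [if_neg h2, if_pos h1, if_pos (Or.inl h1.symm), ← h1, PySem.Dict.getD_eq_get?_getD]
  · rw [if_neg h2, if_neg h1, if_neg (by omega)]

theorem get?_foldInner (a : Int) : ∀ (L : List (Int × Int)) (m : PySem.Dict Int Int) (k : Int),
    (L.foldl (billboardInner a) m).get? k = clampfold (hsOf a k L) (m.get? k) := by
  intro L
  induction L with
  | nil => intro m k; simp [hsOf, clampfold]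
  | cons ds L ih =>
    intro m k
    rw [List.foldl_cons, ih]
    by_cases hc : |ds.1 - a| = k ∨ |ds.1 + a| = k
    · rw [show hsOf a k (ds :: L) = (ds.2 + a) :: hsOf a k L by simp [hsOf, hc]]
      simp only [clampfold, List.foldl_cons, inner_get? a m ds k, if_pos hc]
    · rw [show hsOf a k (ds :: L) = hsOf a k L by simp [hsOf, hc],
        inner_get? a m ds k, if_neg hc]

theorem foldl_max_shift : ∀ (W : List Int) (b c : Int),
    W.foldl max (max b c) = max b (W.foldl max c) := by
  intro W
  induction W with
  | nil => intro b c; rfl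
  | cons x W ih =>
    intro b c
    rw [List.foldl_cons, max_assoc, ih, List.foldl_cons]

theorem clampfold_char : ∀ (W : List Int) (init : Option Int), (∀ v, init = some v → 0 ≤ v) →
    clampfold W init
      = match init, W with
        | none, [] => none
        | _, _ => some (max (init.getD 0) (W.foldl max 0)) := by
  intro W
  induction W with
  | nil =>
    intro init hp
    cases hv : init with
    | none => rfl
    | some v =>
      have := hp v hv
      simp only [clampfold, List.foldl_nil, Option.getD_some]
      rw [max_eq_left this]
  | cons w W ih =>
    intro init hp
    have h0 : 0 ≤ init.getD 0 := by
      cases hv : init with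
      | none => simp
      | some v => simpa using hp v hv
    have step : clampfold (w :: W) init = clampfold W (some (max (init.getD 0) w)) := rfl
    have hshift : (w :: W).foldl max 0 = max (max 0 w) (W.foldl max 0) := by
      rw [List.foldl_cons]
      conv_lhs => rw [show max 0 w = max (max 0 w) 0 from (max_eq_left (le_max_left 0 w)).symm]
      rw [foldl_max_shift]
    rw [step, ih (some (max (init.getD 0) w))
      (by intro v hv; simp only [Option.some.injEq] at hv; subst hv
          exact le_trans h0 (le_max_left _ _))]
    cases hv : init with
    | none =>
      simp only [Option.getD_some, Option.getD_none, hshift]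
      apply congrArg some
      apply le_antisymm <;> simp only [max_le_iff, le_max_iff] <;> omega
    | some v =>
      have hv0 := hp v hv
      simp only [Option.getD_some, hshift]
      apply congrArg some
      apply le_antisymm <;> simp only [max_le_iff, le_max_iff] <;> omega

theorem foldl_max_le : ∀ (W : List Int) (b c : Int), b ≤ c → (∀ w ∈ W, w ≤ c) →
    W.foldl max b ≤ c := by
  intro W
  induction W with
  | nil => intro b c h _; exact h
  | cons x W ih =>
    intro b c h hall
    rw [List.foldl_cons]
    exact ih _ c (max_le h (hall x List.mem_cons_self)) (fun w hw => hall w (List.mem_cons_of_mem x hw))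

theorem base_le_foldl_max : ∀ (W : List Int) (b : Int), b ≤ W.foldl max b := by
  intro W
  induction W with
  | nil => intro b; exact le_refl b
  | cons x W ih =>
    intro b
    rw [List.foldl_cons]
    exact le_trans (le_max_left b x) (ih (max b x))

theorem mem_le_foldl_max : ∀ (W : List Int) (b w : Int), w ∈ W → w ≤ W.foldl max b := by
  intro W
  induction W with
  | nil => intro _ w hw; cases hw
  | cons x W ih =>
    intro b w hw
    rw [List.foldl_cons]
    rcases List.mem_cons.mp hw with rfl | hw
    · exact le_trans (le_max_right b w) (base_le_foldl_max W _)
    · exact ih _ w hw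

theorem foldl_max_congr {W1 W2 : List Int} (b : Int) (h : ∀ w, w ∈ W1 ↔ w ∈ W2) :
    W1.foldl max b = W2.foldl max b := by
  apply le_antisymm
  · exact foldl_max_le W1 b _ (base_le_foldl_max W2 b)
      (fun w hw => mem_le_foldl_max W2 b w ((h w).mp hw))
  · exact foldl_max_le W2 b _ (base_le_foldl_max W1 b)
      (fun w hw => mem_le_foldl_max W1 b w ((h w).mpr hw))

theorem clampfold_congr {W1 W2 : List Int} {init : Option Int}
    (hp : ∀ v, init = some v → 0 ≤ v) (h : ∀ w, w ∈ W1 ↔ w ∈ W2) :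
    clampfold W1 init = clampfold W2 init := by
  rw [clampfold_char W1 init hp, clampfold_char W2 init hp]
  rcases hW1 : W1 with _ | ⟨x, W⟩ <;> rcases hW2 : W2 with _ | ⟨y, W'⟩
  · rfl
  · exact absurd ((h y).mpr (by rw [hW2]; simp)) (by rw [hW1]; simp)
  · exact absurd ((h x).mp (by rw [hW1]; simp)) (by rw [hW2]; simp)
  · subst hW1; subst hW2
    cases init with
    | none => rw [foldl_max_congr 0 h]
    | some v => rw [foldl_max_congr 0 h]

theorem nodup_foldInner (a : Int) : ∀ (L : List (Int × Int)) (m : PySem.Dict Int Int),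
    m.keys.Nodup → (L.foldl (billboardInner a) m).keys.Nodup := by
  intro L
  induction L with
  | nil => intro m h; exact h
  | cons ds L ih =>
    intro m h
    rw [List.foldl_cons]
    exact ih _ (PySem.Dict.nodup_keys_insert _ _ _ (PySem.Dict.nodup_keys_insert _ _ _ h))

def InvA (q : List Int) (dic : PySem.Dict Int Int) : Prop :=
  dic.keys.Nodup ∧ ∀ k : Int, dic.get? k = if 0 ≤ k then G q k else none

theorem key_cases {d a k : Int} (hd : 0 ≤ d) (hk : 0 ≤ k)
    (hcond : |d - a| = k ∨ |d + a| = k) : d = |k - a| ∨ d = |k + a| := by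
  rcases abs_cases (d - a) with ⟨e1, _⟩ | ⟨e1, _⟩ <;>
    rcases abs_cases (d + a) with ⟨e2, _⟩ | ⟨e2, _⟩ <;>
    rcases abs_cases (k - a) with ⟨e3, _⟩ | ⟨e3, _⟩ <;>
    rcases abs_cases (k + a) with ⟨e4, _⟩ | ⟨e4, _⟩ <;>
    rcases hcond with hc | hc <;> omega

theorem cond_left {a k : Int} (hk : 0 ≤ k) : |(|k - a|) - a| = k ∨ |(|k - a|) + a| = k := by
  rcases abs_cases (k - a) with ⟨he, _⟩ | ⟨he, _⟩ <;> rw [he]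
  · right; rw [show k - a + a = k by ring, abs_of_nonneg hk]
  · left; rw [show -(k - a) - a = -k by ring, abs_neg, abs_of_nonneg hk]

theorem cond_right {a k : Int} (hk : 0 ≤ k) : |(|k + a|) - a| = k ∨ |(|k + a|) + a| = k := by
  rcases abs_cases (k + a) with ⟨he, _⟩ | ⟨he, _⟩ <;> rw [he]
  · left; rw [show k + a - a = k by ring, abs_of_nonneg hk]
  · right; rw [show -(k + a) + a = -k by ring, abs_neg, abs_of_nonneg hk]

theorem step_inv {q : List Int} {dic : PySem.Dict Int Int} {a : Int} (h : InvA q dic) :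
    InvA (a :: q) (billboardStep dic a) := by
  obtain ⟨hnd, hget⟩ := h
  have hitem : ∀ ds : Int × Int, ds ∈ dic.items → 0 ≤ ds.1 ∧ G q ds.1 = some ds.2 := by
    intro ds hds
    obtain ⟨d, sv⟩ := ds
    have hg : dic.get? d = some sv := PySem.Dict.get?_of_mem_items _ hds hnd
    rw [hget d] at hg
    split at hg
    · exact ⟨by assumption, hg⟩
    · cases hg
  have hmemhs : ∀ k w, w ∈ hsOf a k dic.items ↔
      ∃ ds : Int × Int, ds ∈ dic.items ∧ (|ds.1 - a| = k ∨ |ds.1 + a| = k) ∧ w = ds.2 + a := by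
    intro k w
    constructor
    · intro hsm
      obtain ⟨ds, hds, hif⟩ := List.mem_filterMap.mp hsm
      split at hif
      · exact ⟨ds, hds, by assumption, by cases hif; rfl⟩
      · cases hif
    · rintro ⟨ds, hds, hcond, rfl⟩
      exact List.mem_filterMap.mpr ⟨ds, hds, by rw [if_pos hcond]⟩
  have hmem_of_get : ∀ k d s : Int, 0 ≤ k → 0 ≤ d → G q d = some s →
      (|d - a| = k ∨ |d + a| = k) → (s + a) ∈ hsOf a k dic.items := by
    intro k d s _ hd hG hcond
    have hg : dic.get? d = some s := by rw [hget d, if_pos hd]; exact hG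
    have hds : (d, s) ∈ dic.items :=
      (PySem.Dict.get?_eq_some_iff_mem_items _ _ _ hnd).mp hg
    exact (hmemhs k (s + a)).mpr ⟨(d, s), hds, hcond, rfl⟩
  refine ⟨nodup_foldInner a dic.items dic hnd, ?_⟩
  intro k
  rw [show billboardStep dic a = dic.items.foldl (billboardInner a) dic from rfl,
    get?_foldInner, hget k]
  by_cases hk : 0 ≤ k
  · rw [if_pos hk, if_pos hk]
    -- the two candidate writes of the recurrence, as an explicit list
    rcases hc1 : G q |k - a| with _ | s1 <;> rcases hc2 : G q |k + a| with _ | s2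
    · -- no key writes to k: both candidate keys absent
      rw [show G (a :: q) k
          = billboardCombine (billboardCombine (G q k) a (G q |k - a|)) a (G q |k + a|) from rfl,
        hc1, hc2]
      have hW : ∀ w, w ∈ hsOf a k dic.items ↔ w ∈ ([] : List Int) := by
        intro w
        simp only [List.not_mem_nil, iff_false]
        intro hsm
        obtain ⟨ds, hds, hcond, rfl⟩ := (hmemhs k _).mp hsm
        obtain ⟨hd0, hGd⟩ := hitem ds hds
        rcases key_cases hd0 hk hcond with hc | hc <;> rw [hc] at hGd <;> simp_all
      rw [clampfold_congr (fun v hv => G_nonneg q k v hv) hW]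
      rfl
    · rw [show G (a :: q) k
          = billboardCombine (billboardCombine (G q k) a (G q |k - a|)) a (G q |k + a|) from rfl,
        hc1, hc2]
      have hW : ∀ w, w ∈ hsOf a k dic.items ↔ w ∈ [s2 + a] := by
        intro w
        constructor
        · intro hsm
          obtain ⟨ds, hds, hcond, rfl⟩ := (hmemhs k _).mp hsm
          obtain ⟨hd0, hGd⟩ := hitem ds hds
          rcases key_cases hd0 hk hcond with hc | hc <;> rw [hc] at hGd
          · rw [hc1] at hGd; cases hGd
          · rw [hc2] at hGd; cases hGd; simp
        · intro hw
          rcases List.mem_singleton.mp hw with rfl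
          exact hmem_of_get k |k + a| s2 hk (abs_nonneg _) hc2 (cond_right hk)
      rw [clampfold_congr (fun v hv => G_nonneg q k v hv) hW]
      rfl
    · rw [show G (a :: q) k
          = billboardCombine (billboardCombine (G q k) a (G q |k - a|)) a (G q |k + a|) from rfl,
        hc1, hc2]
      have hW : ∀ w, w ∈ hsOf a k dic.items ↔ w ∈ [s1 + a] := by
        intro w
        constructor
        · intro hsm
          obtain ⟨ds, hds, hcond, rfl⟩ := (hmemhs k _).mp hsm
          obtain ⟨hd0, hGd⟩ := hitem ds hds
          rcases key_cases hd0 hk hcond with hc | hc <;> rw [hc] at hGd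
          · rw [hc1] at hGd; cases hGd; simp
          · rw [hc2] at hGd; cases hGd
        · intro hw
          rcases List.mem_singleton.mp hw with rfl
          exact hmem_of_get k |k - a| s1 hk (abs_nonneg _) hc1 (cond_left hk)
      rw [clampfold_congr (fun v hv => G_nonneg q k v hv) hW]
      rfl
    · rw [show G (a :: q) k
          = billboardCombine (billboardCombine (G q k) a (G q |k - a|)) a (G q |k + a|) from rfl,
        hc1, hc2]
      have hW : ∀ w, w ∈ hsOf a k dic.items ↔ w ∈ [s1 + a, s2 + a] := by
        intro w
        constructor
        · intro hsm
          obtain ⟨ds, hds, hcond, rfl⟩ := (hmemhs k _).mp hsm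
          obtain ⟨hd0, hGd⟩ := hitem ds hds
          rcases key_cases hd0 hk hcond with hc | hc <;> rw [hc] at hGd
          · rw [hc1] at hGd; cases hGd; simp
          · rw [hc2] at hGd; cases hGd; simp
        · intro hw
          rcases List.mem_cons.mp hw with rfl | hw
          · exact hmem_of_get k |k - a| s1 hk (abs_nonneg _) hc1 (cond_left hk)
          · rcases List.mem_singleton.mp hw with rfl
            exact hmem_of_get k |k + a| s2 hk (abs_nonneg _) hc2 (cond_right hk)
      rw [clampfold_congr (fun v hv => G_nonneg q k v hv) hW]
      rfl
  · rw [if_neg hk, if_neg hk]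
    have hnil : hsOf a k dic.items = [] := by
      rw [hsOf, List.filterMap_eq_nil_iff]
      intro ds _
      have hno : ¬ (|ds.1 - a| = k ∨ |ds.1 + a| = k) := by
        rintro (hc | hc)
        · have := abs_nonneg (ds.1 - a); omega
        · have := abs_nonneg (ds.1 + a); omega
      rw [if_neg hno]
    rw [hnil]
    rfl

theorem foldA_inv : ∀ (l q : List Int) (dic : PySem.Dict Int Int), InvA q dic →
    InvA (l.reverse ++ q) (l.foldl billboardStep dic) := by
  intro l
  induction l with
  | nil => intro q dic h; simpa using h
  | cons a t ih =>
    intro q dic h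
    have := ih (a :: q) (billboardStep dic a) (step_inv h)
    simpa [List.foldl] using this

theorem billboard_eq (line : List Int) :
    billboard line = PySem.Int.floordiv ((G line.reverse 0).getD 0) 2 := by
  have hbase : InvA [] ((PySem.Dict.empty).insert 0 0) := by
    refine ⟨PySem.Dict.nodup_keys_insert _ _ _ PySem.Dict.nodup_keys_empty, ?_⟩
    intro k
    rw [PySem.Dict.get?_insert, PySem.Dict.get?_empty]
    by_cases hk : k = 0
    · subst hk; rfl
    · rw [if_neg hk]
      split
      · rw [show G [] k = if k = 0 then some 0 else none from rfl, if_neg hk]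
      · rfl
  have hinv := foldA_inv line [] ((PySem.Dict.empty).insert 0 0) hbase
  rw [List.append_nil] at hinv
  rw [show billboard line
      = PySem.Int.floordiv ((line.foldl billboardStep ((PySem.Dict.empty).insert 0 0)).getD 0 0) 2
    from rfl, PySem.Dict.getD_eq_get?_getD, hinv.2 0, if_pos (le_refl (0 : Int))]

-- ===== VERDICT (by name: the statement is the Claim_ definition above) =====
theorem billboard_spec : Claim_equal_billboard := by
  intro line _
  unfold Spec_billboard
  rw [billboard_eq line, billboard_alt_eq line]
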